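-- pv_equiv track=rewrite | github.com/santoshrachakonda7/cp | LatinSquare.py | isLatinSquare
-- ===== SOURCE A (Python) =====
-- def isLatinSquare(lst):
--     # Your code goes here...
--     s = set(j for i in lst for j in i)
--     t = zip(*lst)
--     for i,j in zip(lst,t):
--         for k in s:
--             if k not in i or k not in j:
--                 return False
--     return True
-- ===== SOURCE B (Python) =====
-- def isLatinSquare(lst):
--     # k = the number of row/column pairs the grid has: rows capped by its
--     # width (shortest row), columns capped by its height
--     k = min([len(lst), *map(len, lst)])
--     rows_of = {}
--     cols_of = {}
--     for i, row in enumerate(lst):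
--         for j, x in enumerate(row):
--             rows_of.setdefault(x, set()).add(i)
--             cols_of.setdefault(x, set()).add(j)
--     need = set(range(k))
--     return all(need <= rows_of[x] and need <= cols_of[x] for x in rows_of)
-- ===== Notes on version B (the rewrite author's own statement) =====
-- stated objective: alternative
-- what changed: B makes one pass over the cells building an inverted index (symbol -> set of row indices, set of column indices) and then checks every symbol covers the first k row and column indices (k = min of height and width), instead of A's per-row, per-symbol membership scans over rows and the transposed columns.
import Mathlib
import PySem

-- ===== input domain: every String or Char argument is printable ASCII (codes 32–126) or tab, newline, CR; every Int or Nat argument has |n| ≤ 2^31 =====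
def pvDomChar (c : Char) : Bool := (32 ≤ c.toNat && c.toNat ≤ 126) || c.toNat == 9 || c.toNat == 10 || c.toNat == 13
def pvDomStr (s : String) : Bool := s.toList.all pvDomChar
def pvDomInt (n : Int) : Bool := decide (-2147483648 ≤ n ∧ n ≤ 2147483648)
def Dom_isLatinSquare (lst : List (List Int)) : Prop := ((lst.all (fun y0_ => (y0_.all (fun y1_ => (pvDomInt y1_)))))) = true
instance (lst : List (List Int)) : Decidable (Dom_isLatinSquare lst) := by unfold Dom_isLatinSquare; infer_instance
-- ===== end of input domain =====

-- B replaces A's per-row, per-symbol membership scans by one pass over the cells that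
-- builds an inverted index (symbol -> set of row indices, set of column indices) and then
-- checks every symbol covers the first k row and column indices; objective: alternative.

-- ===== PORT A =====
-- number of columns produced by zip(*lst): the minimum row length (0 for an empty list)
def pvNcols (lst : List (List Int)) : Nat :=
  match lst.map List.length with
  | [] => 0
  | x :: xs => xs.foldl min x

def isLatinSquare (lst : List (List Int)) : Bool :=
  -- s = set(j for i in lst for j in i)
  let s : PySem.Set Int := PySem.Set.ofList (lst.flatMap (fun i => i))
  -- t = zip(*lst)  (each column has one entry per row; indices are in range by pvNcols)
  let t : List (List Int) := (List.range (pvNcols lst)).map (fun c => lst.map (fun r => r.getD c 0))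
  -- for i,j in zip(lst,t): for k in s: if k not in i or k not in j: return False
  (lst.zip t).all (fun ij => s.all (fun k => ij.1.contains k && ij.2.contains k))

-- ===== PORT B =====
def isLatinSquare_alt (lst : List (List Int)) : Bool :=
  -- k = min([len(lst), *map(len, lst)])
  let k : Int := PySem.List.minD ((lst.length : Int) :: lst.map (fun r => (r.length : Int))) (fun x => x) 0
  -- for i, row in enumerate(lst): for j, x in enumerate(row):
  --   rows_of.setdefault(x, set()).add(i); cols_of.setdefault(x, set()).add(j)
  let st : PySem.Dict Int (PySem.Set Int) × PySem.Dict Int (PySem.Set Int) :=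
    (PySem.List.enumerate lst).foldl (fun st p =>
      (PySem.List.enumerate p.2).foldl (fun st2 q =>
        (st2.1.modify q.2 PySem.Set.empty (fun s => PySem.Set.add s p.1),
         st2.2.modify q.2 PySem.Set.empty (fun s => PySem.Set.add s q.1))) st)
      (PySem.Dict.empty, PySem.Dict.empty)
  -- need = set(range(k))
  let need : PySem.Set Int := PySem.Set.ofList (PySem.List.pyRange 0 k 1)
  -- all(need <= rows_of[x] and need <= cols_of[x] for x in rows_of)
  (PySem.Dict.keys st.1).all (fun x =>
    PySem.Set.issubset need ((st.1).getD x PySem.Set.empty) &&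
    PySem.Set.issubset need ((st.2).getD x PySem.Set.empty))

-- ===== PRECONDITION & SPEC =====
def Spec_isLatinSquare (lst : List (List Int)) (out : Bool) : Prop := out = isLatinSquare_alt lst
instance (lst : List (List Int)) (out : Bool) : Decidable (Spec_isLatinSquare lst out) := by unfold Spec_isLatinSquare; infer_instance

-- ===== CLAIM (what is proved, stated in full; the proofs are below) =====
def Claim_equal_isLatinSquare : Prop := ∀ (lst : List (List Int)), Dom_isLatinSquare lst → Spec_isLatinSquare lst (isLatinSquare lst)

-- ===== LEMMAS AND PROOFS =====

-- one component of B's fold: index the symbols of row p, recording sel p q for each cell q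
def pvIdxF (sel : (Int × List Int) → (Int × Int) → Int)
    (d : PySem.Dict Int (PySem.Set Int)) (p : Int × List Int) : PySem.Dict Int (PySem.Set Int) :=
  (PySem.List.enumerate p.2).foldl
    (fun d2 q => d2.modify q.2 PySem.Set.empty (fun s => PySem.Set.add s (sel p q))) d

-- a componentwise foldl over a pair is the pair of foldls
theorem foldl_pair {α β γ : Type} (l : List γ) (f : α → γ → α) (g : β → γ → β) (a : α) (b : β) :
    l.foldl (fun st q => (f st.1 q, g st.2 q)) (a, b) = (l.foldl f a, l.foldl g b) := by
  induction l generalizing a b with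
  | nil => rfl
  | cons q l ih => simp [List.foldl_cons, ih]

theorem b_fold_eq (lst : List (List Int)) :
    (PySem.List.enumerate lst).foldl (fun st p =>
      (PySem.List.enumerate p.2).foldl (fun st2 q =>
        (st2.1.modify q.2 PySem.Set.empty (fun s => PySem.Set.add s p.1),
         st2.2.modify q.2 PySem.Set.empty (fun s => PySem.Set.add s q.1))) st)
      ((PySem.Dict.empty : PySem.Dict Int (PySem.Set Int)), (PySem.Dict.empty : PySem.Dict Int (PySem.Set Int)))
    = ((PySem.List.enumerate lst).foldl (pvIdxF (fun p _ => p.1)) PySem.Dict.empty,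
       (PySem.List.enumerate lst).foldl (pvIdxF (fun _ q => q.1)) PySem.Dict.empty) := by
  have hstep : (fun (st : PySem.Dict Int (PySem.Set Int) × PySem.Dict Int (PySem.Set Int)) (p : Int × List Int) =>
      (PySem.List.enumerate p.2).foldl (fun st2 q =>
        (st2.1.modify q.2 PySem.Set.empty (fun s => PySem.Set.add s p.1),
         st2.2.modify q.2 PySem.Set.empty (fun s => PySem.Set.add s q.1))) st)
      = fun st p => (pvIdxF (fun p _ => p.1) st.1 p, pvIdxF (fun _ q => q.1) st.2 p) := by
    funext st p
    exact foldl_pair (PySem.List.enumerate p.2)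
      (fun d2 q => d2.modify q.2 PySem.Set.empty (fun s => PySem.Set.add s p.1))
      (fun d2 q => d2.modify q.2 PySem.Set.empty (fun s => PySem.Set.add s q.1)) st.1 st.2
  rw [hstep, foldl_pair]

-- membership in the value sets after one row of updates (inner fold, generalized)
theorem inner_getD_mem (cs : List (Int × Int)) (d : PySem.Dict Int (PySem.Set Int))
    (x y : Int) (sel : Int × Int → Int) :
    y ∈ (cs.foldl (fun d2 q => d2.modify q.2 PySem.Set.empty (fun s => PySem.Set.add s (sel q))) d).getD x PySem.Set.empty
      ↔ y ∈ d.getD x PySem.Set.empty ∨ ∃ q ∈ cs, q.2 = x ∧ sel q = y := by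
  induction cs generalizing d with
  | nil => simp
  | cons c cs ih =>
    rw [List.foldl_cons, ih, PySem.Dict.getD_modify]
    by_cases h : x = c.2
    · subst h
      rw [if_pos rfl, PySem.Set.mem_add]
      simp only [List.mem_cons]
      constructor
      · rintro (h1 | h1)
        · rcases h1 with h1 | h1
          · exact Or.inl h1
          · exact Or.inr ⟨c, Or.inl rfl, rfl, h1.symm⟩
        · rcases h1 with ⟨q, hq, hq2, hqs⟩
          exact Or.inr ⟨q, Or.inr hq, hq2, hqs⟩
      · rintro (h1 | ⟨q, hq | hq, hq2, hqs⟩)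
        · exact Or.inl (Or.inl h1)
        · subst hq; exact Or.inl (Or.inr hqs.symm)
        · exact Or.inr ⟨q, hq, hq2, hqs⟩
    · simp only [if_neg h, List.mem_cons]
      constructor
      · rintro (h1 | ⟨q, hq, hq2, hqs⟩)
        · exact Or.inl h1
        · exact Or.inr ⟨q, Or.inr hq, hq2, hqs⟩
      · rintro (h1 | ⟨q, hq | hq, hq2, hqs⟩)
        · exact Or.inl h1
        · subst hq; exact absurd hq2.symm h
        · exact Or.inr ⟨q, hq, hq2, hqs⟩

theorem inner_keys_mem (cs : List (Int × Int)) (d : PySem.Dict Int (PySem.Set Int))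
    (x : Int) (sel : Int × Int → Int) :
    x ∈ (cs.foldl (fun d2 q => d2.modify q.2 PySem.Set.empty (fun s => PySem.Set.add s (sel q))) d).keys
      ↔ x ∈ d.keys ∨ ∃ q ∈ cs, q.2 = x := by
  induction cs generalizing d with
  | nil => simp
  | cons c cs ih =>
    rw [List.foldl_cons, ih, PySem.Dict.keys_modify]
    rw [PySem.Dict.mem_keys_insert]
    simp only [List.mem_cons]
    constructor
    · rintro ((h | h) | ⟨q, hq, hq2⟩)
      · exact Or.inr ⟨c, Or.inl rfl, h.symm⟩
      · exact Or.inl h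
      · exact Or.inr ⟨q, Or.inr hq, hq2⟩
    · rintro (h | ⟨q, hq | hq, hq2⟩)
      · exact Or.inl (Or.inr h)
      · subst hq; exact Or.inl (Or.inl hq2.symm)
      · exact Or.inr ⟨q, hq, hq2⟩

-- a cell with symbol x exists in row xs iff x is a member of xs
theorem exists_enumerate_snd (xs : List Int) (x : Int) :
    (∃ q ∈ PySem.List.enumerate xs, q.2 = x) ↔ x ∈ xs := by
  constructor
  · rintro ⟨q, hq, hq2⟩
    rcases (PySem.List.mem_enumerate_iff _ _ _).mp hq with ⟨k, hk, rfl⟩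
    exact hq2 ▸ List.getElem_mem hk
  · intro hx
    rcases List.mem_iff_getElem.mp hx with ⟨k, hk, hkx⟩
    exact ⟨(0 + (k : Int), xs[k]), (PySem.List.mem_enumerate_iff _ _ _).mpr ⟨k, hk, rfl⟩, hkx⟩

theorem outer_getD_mem (sel : (Int × List Int) → (Int × Int) → Int)
    (l : List (Int × List Int)) (d : PySem.Dict Int (PySem.Set Int)) (x y : Int) :
    y ∈ (l.foldl (pvIdxF sel) d).getD x PySem.Set.empty
      ↔ y ∈ d.getD x PySem.Set.empty ∨ ∃ p ∈ l, ∃ q ∈ PySem.List.enumerate p.2, q.2 = x ∧ sel p q = y := by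
  induction l generalizing d with
  | nil => simp
  | cons p l ih =>
    rw [List.foldl_cons, ih]
    unfold pvIdxF
    rw [inner_getD_mem]
    simp only [List.mem_cons]
    constructor
    · rintro ((h | ⟨q, hq, hq2, hqs⟩) | ⟨p', hp', rest⟩)
      · exact Or.inl h
      · exact Or.inr ⟨p, Or.inl rfl, q, hq, hq2, hqs⟩
      · exact Or.inr ⟨p', Or.inr hp', rest⟩
    · rintro (h | ⟨p', hp' | hp', rest⟩)
      · exact Or.inl (Or.inl h)
      · subst hp'; exact Or.inl (Or.inr rest)
      · exact Or.inr ⟨p', hp', rest⟩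

theorem outer_keys_mem (sel : (Int × List Int) → (Int × Int) → Int)
    (l : List (Int × List Int)) (d : PySem.Dict Int (PySem.Set Int)) (x : Int) :
    x ∈ (l.foldl (pvIdxF sel) d).keys
      ↔ x ∈ d.keys ∨ ∃ p ∈ l, x ∈ p.2 := by
  induction l generalizing d with
  | nil => simp
  | cons p l ih =>
    rw [List.foldl_cons, ih]
    unfold pvIdxF
    rw [inner_keys_mem]
    simp only [List.mem_cons]
    have hmem := exists_enumerate_snd p.2 x
    constructor
    · rintro ((h | h) | ⟨p', hp', hx⟩)
      · exact Or.inl h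
      · exact Or.inr ⟨p, Or.inl rfl, hmem.mp h⟩
      · exact Or.inr ⟨p', Or.inr hp', hx⟩
    · rintro (h | ⟨p', hp' | hp', hx⟩)
      · exact Or.inl (Or.inl h)
      · subst hp'; exact Or.inl (Or.inr (hmem.mpr hx))
      · exact Or.inr ⟨p', hp', hx⟩

-- all over a zip equals all over the index range of the shorter list
theorem all_zip_eq_range {α β : Type} (xs : List α) (ys : List β) (dx : α) (dy : β)
    (p : α × β → Bool) :
    (xs.zip ys).all p
      = (List.range (min xs.length ys.length)).all (fun i => p (xs.getD i dx, ys.getD i dy)) := by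
  induction xs generalizing ys with
  | nil => simp
  | cons x xs ih =>
    cases ys with
    | nil => simp
    | cons y ys =>
      simp only [List.zip_cons_cons, List.all_cons, List.length_cons, Nat.succ_min_succ,
        List.range_succ_eq_map, List.all_cons, List.all_map]
      rw [ih ys]
      simp [Function.comp_def]

-- Python's min of a nonempty list is a left fold of the binary min
theorem min?_id_cons : ∀ (l : List Int) (a : Int),
    PySem.List.min? (a :: l) (fun x => x) = some (l.foldl min a) := by
  intro l
  induction l with
  | nil => intro a; rfl
  | cons c l ih =>
    intro a
    have step : PySem.List.min? (a :: c :: l) (fun x : Int => x)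
        = PySem.List.min? ((if c < a then c else a) :: l) (fun x : Int => x) := by
      by_cases h2 : c < a
      · rw [if_pos h2]
        unfold PySem.List.min?
        simp only [List.foldl_cons]
        congr 1
        show (if c < a then some c else some a) = some c
        rw [if_pos h2]
      · rw [if_neg h2]
        unfold PySem.List.min?
        simp only [List.foldl_cons]
        congr 1
        show (if c < a then some c else some a) = some a
        rw [if_neg h2]
    rw [step, ih, List.foldl_cons]
    congr 1
    rw [min_def]
    split_ifs <;> omega

theorem minD_cons (a : Int) (l : List Int) (d : Int) :
    PySem.List.minD (a :: l) (fun x => x) d = l.foldl min a := by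
  unfold PySem.List.minD
  rw [min?_id_cons]
  rfl

-- the min-fold is bounded by its initial value
theorem foldl_min_le_init (l : List Nat) (a : Nat) : l.foldl min a ≤ a := by
  induction l generalizing a with
  | nil => exact le_rfl
  | cons c l ih => rw [List.foldl_cons]; exact le_trans (ih _) (Nat.min_le_left _ _)

-- pulling an element out of a min-fold
theorem foldl_min_out (l : List Nat) (a b : Nat) :
    l.foldl min (min a b) = min a (l.foldl min b) := by
  induction l generalizing b with
  | nil => rfl
  | cons c l ih =>
    rw [List.foldl_cons, List.foldl_cons, Nat.min_assoc, ih]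

-- the min-fold is a lower bound for every member
theorem foldl_min_le_mem (l : List Nat) (a b : Nat) (hb : b ∈ l) : l.foldl min a ≤ b := by
  induction l generalizing a with
  | nil => cases hb
  | cons c l ih =>
    rw [List.foldl_cons]
    rcases List.mem_cons.mp hb with rfl | hb
    · exact le_trans (foldl_min_le_init _ _) (Nat.min_le_right a b)
    · exact ih _ hb

-- a min-fold over casts is the cast of the min-fold
theorem foldl_min_cast (l : List Nat) (a : Nat) :
    (l.map (fun n : Nat => (n : Int))).foldl min (a : Int) = ((l.foldl min a : Nat) : Int) := by
  induction l generalizing a with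
  | nil => rfl
  | cons c l ih =>
    rw [List.map_cons, List.foldl_cons, List.foldl_cons, ← Nat.cast_min, ih]

-- B's k is min(height, width)
theorem k_eq (lst : List (List Int)) :
    PySem.List.minD ((lst.length : Int) :: lst.map (fun r => (r.length : Int))) (fun x => x) 0
      = ((min lst.length (pvNcols lst) : Nat) : Int) := by
  rw [minD_cons]
  have hmap : lst.map (fun r => (r.length : Int)) = (lst.map List.length).map (fun n : Nat => (n : Int)) := by
    rw [List.map_map]; rfl
  rw [hmap, foldl_min_cast]
  congr 1
  unfold pvNcols
  cases h : lst.map List.length with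
  | nil =>
    have : lst = [] := List.map_eq_nil_iff.mp h
    subst this
    rfl
  | cons x xs =>
    show (x :: xs).foldl min lst.length = min lst.length (xs.foldl min x)
    rw [List.foldl_cons, foldl_min_out]

-- every row is at least pvNcols long
theorem pvNcols_le (lst : List (List Int)) (r : List Int) (hr : r ∈ lst) :
    pvNcols lst ≤ r.length := by
  unfold pvNcols
  cases h : lst.map List.length with
  | nil => exact absurd (List.map_eq_nil_iff.mp h ▸ hr) (List.not_mem_nil)
  | cons x xs =>
    show xs.foldl min x ≤ r.length
    have : r.length ∈ x :: xs := by
      rw [← h]; exact List.mem_map.mpr ⟨r, hr, rfl⟩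
    rcases List.mem_cons.mp this with heq | hmem
    · exact heq ▸ foldl_min_le_init xs x
    · exact foldl_min_le_mem _ _ _ hmem

-- ===== VERDICT (by name: the statement is the Claim_ definition above) =====
theorem isLatinSquare_spec : Claim_equal_isLatinSquare := by
  intro lst _
  unfold Spec_isLatinSquare
  -- k: the number of row/column pairs
  have hcol : ∀ i, i < pvNcols lst →
      ((List.range (pvNcols lst)).map (fun c => lst.map (fun r => r.getD c 0))).getD i ([] : List Int)
        = lst.map (fun r => r.getD i 0) := by
    intro i hi
    rw [List.getD_eq_getElem?_getD, List.getElem?_map, List.getElem?_range hi]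
    rfl
  have hA : (isLatinSquare lst = true) ↔ ∀ i : Nat, i < min lst.length (pvNcols lst) → ∀ x : Int,
      x ∈ lst.flatMap (fun r => r) → x ∈ lst.getD i [] ∧ x ∈ lst.map (fun r => r.getD i 0) := by
    unfold isLatinSquare
    rw [all_zip_eq_range lst _ [] []]
    have h1 : ((List.range (pvNcols lst)).map (fun c => lst.map (fun r => r.getD c 0))).length
        = pvNcols lst := by simp
    rw [h1]
    simp only [List.all_eq_true, List.mem_range, PySem.Set.mem_ofList, Bool.and_eq_true,
      List.contains_iff_mem]
    constructor
    · intro h i hi x hx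
      have h3 := h i hi x hx
      rwa [hcol i (lt_of_lt_of_le hi (Nat.min_le_right _ _))] at h3
    · intro h i hi x hx
      rw [hcol i (lt_of_lt_of_le hi (Nat.min_le_right _ _))]
      exact h i hi x hx
  have hB : (isLatinSquare_alt lst = true) ↔
      ∀ x ∈ ((PySem.List.enumerate lst).foldl (pvIdxF (fun p _ => p.1)) PySem.Dict.empty).keys,
        (∀ y : Int, 0 ≤ y → y < ((min lst.length (pvNcols lst) : Nat) : Int) →
          y ∈ (((PySem.List.enumerate lst).foldl (pvIdxF (fun p _ => p.1)) PySem.Dict.empty).getD x PySem.Set.empty)) ∧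
        (∀ y : Int, 0 ≤ y → y < ((min lst.length (pvNcols lst) : Nat) : Int) →
          y ∈ (((PySem.List.enumerate lst).foldl (pvIdxF (fun _ q => q.1)) PySem.Dict.empty).getD x PySem.Set.empty)) := by
    unfold isLatinSquare_alt
    rw [b_fold_eq, k_eq]
    simp only [List.all_eq_true, Bool.and_eq_true, PySem.Set.issubset_iff, PySem.Set.mem_ofList,
      PySem.List.mem_pyRange_one]
    constructor
    · intro h x hx
      exact ⟨fun y h0 hk => (h x hx).1 y ⟨h0, hk⟩, fun y h0 hk => (h x hx).2 y ⟨h0, hk⟩⟩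
    · intro h x hx
      exact ⟨fun y hy => (h x hx).1 y hy.1 hy.2, fun y hy => (h x hx).2 y hy.1 hy.2⟩
  have hkeys : ∀ x : Int,
      x ∈ ((PySem.List.enumerate lst).foldl (pvIdxF (fun p _ => p.1)) PySem.Dict.empty).keys
        ↔ x ∈ lst.flatMap (fun r => r) := by
    intro x
    rw [outer_keys_mem]
    simp only [PySem.Dict.keys_empty, List.not_mem_nil, false_or]
    constructor
    · rintro ⟨p, hp, hx⟩
      rcases (PySem.List.mem_enumerate_iff _ _ _).mp hp with ⟨k, hk, rfl⟩
      exact List.mem_flatMap.mpr ⟨lst[k], List.getElem_mem hk, hx⟩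
    · intro hx
      rcases List.mem_flatMap.mp hx with ⟨r, hr, hxr⟩
      rcases List.mem_iff_getElem.mp hr with ⟨k, hk, rfl⟩
      exact ⟨(0 + (k : Int), lst[k]), (PySem.List.mem_enumerate_iff _ _ _).mpr ⟨k, hk, rfl⟩, hxr⟩
  -- the row-index set of symbol x
  have hRmem : ∀ x y : Int,
      y ∈ (((PySem.List.enumerate lst).foldl (pvIdxF (fun p _ => p.1)) PySem.Dict.empty).getD x PySem.Set.empty)
        ↔ ∃ i : Nat, ∃ _ : i < lst.length, y = (i : Int) ∧ x ∈ lst[i] := by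
    intro x y
    rw [outer_getD_mem]
    simp only [PySem.Dict.getD_empty, PySem.Set.empty, List.not_mem_nil, false_or]
    constructor
    · rintro ⟨p, hp, q, hq, hq2, hsel⟩
      rcases (PySem.List.mem_enumerate_iff _ _ _).mp hp with ⟨i, hi, rfl⟩
      exact ⟨i, hi, by simpa using hsel.symm, (exists_enumerate_snd _ x).mp ⟨q, hq, hq2⟩⟩
    · rintro ⟨i, hi, rfl, hx⟩
      rcases (exists_enumerate_snd lst[i] x).mpr hx with ⟨q, hq, hq2⟩
      exact ⟨(0 + (i : Int), lst[i]), (PySem.List.mem_enumerate_iff _ _ _).mpr ⟨i, hi, rfl⟩,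
        q, hq, hq2, by simp⟩
  -- the column-index set of symbol x
  have hCmem : ∀ x y : Int,
      y ∈ (((PySem.List.enumerate lst).foldl (pvIdxF (fun _ q => q.1)) PySem.Dict.empty).getD x PySem.Set.empty)
        ↔ ∃ i : Nat, ∃ _ : i < lst.length, ∃ k : Nat, ∃ _ : k < lst[i].length,
            lst[i][k] = x ∧ y = (k : Int) := by
    intro x y
    rw [outer_getD_mem]
    simp only [PySem.Dict.getD_empty, PySem.Set.empty, List.not_mem_nil, false_or]
    constructor
    · rintro ⟨p, hp, q, hq, hq2, hsel⟩
      rcases (PySem.List.mem_enumerate_iff _ _ _).mp hp with ⟨i, hi, rfl⟩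
      rcases (PySem.List.mem_enumerate_iff _ _ _).mp hq with ⟨k, hk, rfl⟩
      exact ⟨i, hi, k, hk, hq2, by simpa using hsel.symm⟩
    · rintro ⟨i, hi, k, hk, hx, rfl⟩
      exact ⟨(0 + (i : Int), lst[i]), (PySem.List.mem_enumerate_iff _ _ _).mpr ⟨i, hi, rfl⟩,
        (0 + (k : Int), lst[i][k]), (PySem.List.mem_enumerate_iff _ _ _).mpr ⟨k, hk, rfl⟩,
        hx, by simp⟩
  -- assemble
  rw [Bool.eq_iff_iff, hA, hB]
  constructor
  · intro h x hxk
    have hx : x ∈ lst.flatMap (fun r => r) := (hkeys x).mp hxk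
    constructor
    · intro y h0 hk
      have hiy : y.toNat < min lst.length (pvNcols lst) := by omega
      have hcast : y = ((y.toNat : Nat) : Int) := by omega
      have him : y.toNat < lst.length := lt_of_lt_of_le hiy (Nat.min_le_left _ _)
      have h1 := (h y.toNat hiy x hx).1
      rw [List.getD_eq_getElem?_getD, List.getElem?_eq_getElem him] at h1
      exact (hRmem x y).mpr ⟨y.toNat, him, hcast, h1⟩
    · intro y h0 hk
      have hjy : y.toNat < min lst.length (pvNcols lst) := by omega
      have hcast : y = ((y.toNat : Nat) : Int) := by omega
      have h2 := (h y.toNat hjy x hx).2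
      rcases List.mem_map.mp h2 with ⟨r, hr, hrx⟩
      rcases List.mem_iff_getElem.mp hr with ⟨i, hi, rfl⟩
      have hjlen : y.toNat < lst[i].length :=
        lt_of_lt_of_le (lt_of_lt_of_le hjy (Nat.min_le_right _ _))
          (pvNcols_le lst lst[i] (List.getElem_mem hi))
      rw [List.getD_eq_getElem?_getD, List.getElem?_eq_getElem hjlen] at hrx
      exact (hCmem x y).mpr ⟨i, hi, y.toNat, hjlen, hrx, hcast⟩
  · intro h i hi x hx
    obtain ⟨h1, h2⟩ := h x ((hkeys x).mpr hx)
    have hik : ((i : Nat) : Int) < ((min lst.length (pvNcols lst) : Nat) : Int) := by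
      exact_mod_cast hi
    constructor
    · rcases (hRmem x (i : Int)).mp (h1 (i : Int) (by positivity) hik) with ⟨i', hi', hcast, hxm⟩
      have : i' = i := by exact_mod_cast hcast.symm
      subst this
      rw [List.getD_eq_getElem?_getD, List.getElem?_eq_getElem hi']
      exact hxm
    · rcases (hCmem x (i : Int)).mp (h2 (i : Int) (by positivity) hik) with ⟨i', hi', k, hk, hxm, hcast⟩
      have hki : k = i := by exact_mod_cast hcast.symm
      subst hki
      refine List.mem_map.mpr ⟨lst[i'], List.getElem_mem hi', ?_⟩
      rw [List.getD_eq_getElem?_getD, List.getElem?_eq_getElem hk]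
      exact hxm
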